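-- pv_equiv track=rewrite | github.com/aidi1723/OmniGlyph | src/omniglyph/logos/matcher.py | _is_allowed_context
-- ===== SOURCE A (Python) =====
-- def _is_allowed_context(folded_text: str, allow_context: list[str], match_start: int, match_end: int) -> bool:
--     for context in allow_context:
--         folded_context = context.casefold()
--         start = folded_text.find(folded_context)
--         while start != -1:
--             end = start + len(folded_context)
--             if start <= match_start and end >= match_end:
--                 return True
--             start = folded_text.find(folded_context, start + 1)
--     return False
-- ===== SOURCE B (Python) =====
-- def _is_allowed_context(folded_text: str, allow_context: list[str], match_start: int, match_end: int) -> bool: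
--     n = len(folded_text)
--     for context in allow_context:
--         folded_context = context.casefold()
--         length = len(folded_context)
--         if length == 0:
--             # an empty context covers the span iff the span is empty and sits inside the text
--             if match_end <= match_start and 0 <= match_start and match_end <= n:
--                 return True
--             continue
--         lo = max(0, match_end - length)
--         hi = max(0, match_start + length)
--         if folded_context in folded_text[lo:hi]:
--             return True
--     return False
-- ===== Notes on version B (the rewrite author's own statement) =====
-- stated objective: simpler
-- what changed: A enumerates every occurrence of each context with a find loop and tests whether it covers the match span; B decides each context with a single substring-membership test on the clamped window folded_text[max(0, match_end - len):max(0, match_start + len)] where any covering occurrence must lie, with the empty-context case decided arithmetically.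
import Mathlib
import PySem

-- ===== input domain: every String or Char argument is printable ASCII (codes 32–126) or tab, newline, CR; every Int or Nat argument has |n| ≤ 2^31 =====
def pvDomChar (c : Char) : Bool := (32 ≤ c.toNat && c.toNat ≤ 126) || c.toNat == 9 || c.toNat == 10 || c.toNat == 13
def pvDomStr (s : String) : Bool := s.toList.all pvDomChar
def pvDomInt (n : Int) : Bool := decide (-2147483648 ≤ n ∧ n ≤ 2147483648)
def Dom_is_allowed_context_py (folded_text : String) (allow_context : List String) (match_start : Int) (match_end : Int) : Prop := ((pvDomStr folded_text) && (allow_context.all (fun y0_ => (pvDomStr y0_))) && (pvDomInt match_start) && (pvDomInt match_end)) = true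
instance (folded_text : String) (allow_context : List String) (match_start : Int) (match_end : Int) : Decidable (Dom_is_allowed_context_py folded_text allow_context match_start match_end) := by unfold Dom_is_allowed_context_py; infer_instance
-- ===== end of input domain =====

-- B replaces A's inner enumeration of every occurrence with one membership test on the
-- bounded window where a covering occurrence must lie (objective: simpler).


-- ===== PORT A =====
-- A's inner `while start != -1` loop; `fuel` only bounds the iteration count (the loop
-- makes at most ft.length + 1 steps, which the proofs below establish).
def pvALoop (ft fc : List Char) (ms me : Int) : Int → Nat → Bool
  | _, 0 => false
  | start, fuel + 1 =>
    if start = -1 then false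
    else
      let end_ := start + (fc.length : Int)
      if start ≤ ms ∧ me ≤ end_ then true
      else pvALoop ft fc ms me (PySem.Chars.findFrom ft fc (start + 1) none) fuel

-- context.casefold() is ported as PySem.Chars.lower, exact on the ASCII domain.
def is_allowed_context_py (folded_text : String) (allow_context : List String) (match_start : Int) (match_end : Int) : Bool :=
  match allow_context with
  | [] => false
  | context :: rest =>
    let ft := folded_text.toList
    let fc := PySem.Chars.lower context.toList
    if pvALoop ft fc match_start match_end (PySem.Chars.find ft fc) (ft.length + 1) then true
    else is_allowed_context_py folded_text rest match_start match_end

-- ===== PORT B =====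
-- one context of B: empty contexts are decided arithmetically, otherwise a single
-- membership test on the clamped window folded_text[lo:hi]
def pvBCheck (ft fc : List Char) (ms me : Int) : Bool :=
  if fc.length = 0 then
    decide (me ≤ ms ∧ 0 ≤ ms ∧ me ≤ (ft.length : Int))
  else
    let lo := max 0 (me - (fc.length : Int))
    let hi := max 0 (ms + (fc.length : Int))
    PySem.Chars.isIn fc (PySem.List.slice ft (some lo) (some hi))

-- context.casefold() is ported as PySem.Chars.lower, exact on the ASCII domain.
def is_allowed_context_py_alt (folded_text : String) (allow_context : List String) (match_start : Int) (match_end : Int) : Bool :=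
  allow_context.any (fun context =>
    pvBCheck folded_text.toList (PySem.Chars.lower context.toList) match_start match_end)

-- ===== PRECONDITION & SPEC =====
def Spec_is_allowed_context_py (folded_text : String) (allow_context : List String) (match_start : Int) (match_end : Int) (out : Bool) : Prop := out = is_allowed_context_py_alt folded_text allow_context match_start match_end
instance (folded_text : String) (allow_context : List String) (match_start : Int) (match_end : Int) (out : Bool) : Decidable (Spec_is_allowed_context_py folded_text allow_context match_start match_end out) := by unfold Spec_is_allowed_context_py; infer_instance

-- ===== CLAIM (what is proved, stated in full; the proofs are below) =====
def Claim_equal_is_allowed_context_py : Prop := ∀ (folded_text : String) (allow_context : List String) (match_start : Int) (match_end : Int), Dom_is_allowed_context_py folded_text allow_context match_start match_end → Spec_is_allowed_context_py folded_text allow_context match_start match_end (is_allowed_context_py folded_text allow_context match_start match_end)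

-- ===== LEMMAS AND PROOFS =====

-- "some occurrence of fc in ft covers the span [ms, me)" — the condition both ports decide per context
def pvCovers (ft fc : List Char) (ms me : Int) : Prop :=
  ∃ s : Nat, s ≤ ft.length ∧ fc <+: ft.drop s ∧ (s : Int) ≤ ms ∧ me ≤ (s : Int) + fc.length

lemma pvFindFrom_past (s sub : List Char) : PySem.Chars.findFrom s sub ((s.length : Int) + 1) none = -1 := by
  simp only [PySem.Chars.findFrom]
  have h1 : ¬ ((s.length : Int) + 1 < 0) := by omega
  simp [h1]

lemma pvALoop_neg_one (ft fc : List Char) (ms me : Int) (fuel : Nat) :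
    pvALoop ft fc ms me (-1) fuel = false := by
  cases fuel <;> simp [pvALoop]

lemma pvALoop_eq (ft fc : List Char) (ms me : Int) :
    ∀ (fuel k : Nat), k ≤ ft.length + 1 → ft.length + 1 - k ≤ fuel →
    (pvALoop ft fc ms me (PySem.Chars.findFrom ft fc (k : Int) none) fuel = true ↔
      ∃ s : Nat, k ≤ s ∧ s ≤ ft.length ∧ fc <+: ft.drop s ∧ (s : Int) ≤ ms ∧ me ≤ (s : Int) + fc.length) := by
  intro fuel
  induction fuel with
  | zero =>
    intro k hk hfuel
    have hk1 : k = ft.length + 1 := by omega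
    subst hk1
    rw [show ((ft.length + 1 : Nat) : Int) = (ft.length : Int) + 1 by push_cast; ring,
        pvFindFrom_past]
    simp only [pvALoop_neg_one, Bool.false_eq_true, false_iff]
    rintro ⟨s, hs1, hs2, -⟩; omega
  | succ fuel ih =>
    intro k hk hfuel
    by_cases hk' : k = ft.length + 1
    · subst hk'
      rw [show ((ft.length + 1 : Nat) : Int) = (ft.length : Int) + 1 by push_cast; ring,
          pvFindFrom_past]
      simp only [pvALoop_neg_one, Bool.false_eq_true, false_iff]
      rintro ⟨s, hs1, hs2, -⟩; omega
    · have hklen : k ≤ ft.length := by omega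
      by_cases hneg : PySem.Chars.findFrom ft fc (k : Int) none = -1
      · -- no occurrence at or after k
        rw [hneg, pvALoop_neg_one]
        simp only [Bool.false_eq_true, false_iff]
        rintro ⟨s, hks, hslen, hpre, -⟩
        have hinf : fc <:+: ft.drop k := by
          have hstep : fc <+: (ft.drop k).drop (s - k) := by
            rw [List.drop_drop, show k + (s - k) = s from by omega]; exact hpre
          exact hstep.isInfix.trans (List.drop_suffix _ _).isInfix
        exact ((PySem.Chars.findFrom_natCast_eq_neg_one_iff ft fc k hklen).mp hneg) hinf
      · -- r = first occurrence at or after k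
        obtain ⟨hkr, hpre, hmin⟩ := PySem.Chars.findFrom_natCast_spec ft fc k hklen hneg
        set r : Int := PySem.Chars.findFrom ft fc (k : Int) none with hr
        have hr0 : 0 ≤ r := le_trans (by exact_mod_cast Int.natCast_nonneg k) hkr
        have hrlen : r ≤ ft.length := by
          rw [hr, PySem.Chars.findFrom_natCast ft fc k hklen]
          have h1 := PySem.Chars.find_le_length (ft.drop k) fc
          have h2 : ((ft.drop k).length : Int) = (ft.length : Int) - k := by
            simp [List.length_drop]; omega
          split <;> omega
        have hrcast : ((r.toNat : Nat) : Int) = r := Int.toNat_of_nonneg hr0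
        rw [show fuel + 1 = fuel + 1 from rfl]
        simp only [pvALoop, hneg, if_false]
        by_cases hcond : r ≤ ms ∧ me ≤ r + (fc.length : Int)
        · rw [if_pos hcond]
          simp only [true_iff]
          exact ⟨r.toNat, by omega, by omega, hpre, by omega⟩
        · rw [if_neg hcond]
          have hstep : r + 1 = ((r.toNat + 1 : Nat) : Int) := by push_cast; omega
          rw [hstep, ih (r.toNat + 1) (by omega) (by omega)]
          constructor
          · rintro ⟨s, hs1, h⟩; exact ⟨s, by omega, h⟩
          · rintro ⟨s, hks, hslen, hpre', hms, hme⟩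
            refine ⟨s, ?_, hslen, hpre', hms, hme⟩
            have hsr : r.toNat ≤ s := by
              by_contra hlt
              exact hmin s hks (by omega) hpre'
            rcases Nat.eq_or_lt_of_le hsr with heq | hlt
            · exfalso; apply hcond; constructor <;> omega
            · omega

lemma pvBCheck_eq (ft fc : List Char) (ms me : Int) :
    (pvBCheck ft fc ms me = true ↔ pvCovers ft fc ms me) := by
  unfold pvBCheck pvCovers
  by_cases h0 : fc.length = 0
  · have hfc : fc = [] := List.length_eq_zero_iff.mp h0
    subst hfc
    rw [if_pos (by simp)]
    simp only [decide_eq_true_eq, List.length_nil, Nat.cast_zero]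
    constructor
    · rintro ⟨h1, h2, h3⟩
      exact ⟨(max 0 me).toNat, by omega, List.nil_prefix, by omega, by omega⟩
    · rintro ⟨s, hslen, -, hms, hme⟩
      refine ⟨by omega, by omega, by omega⟩
  · simp only [h0, if_false]
    have hlo : (0:Int) ≤ max 0 (me - (fc.length : Int)) := le_max_left _ _
    have hhi : (0:Int) ≤ max 0 (ms + (fc.length : Int)) := le_max_left _ _
    rw [PySem.List.slice_toNat ft hlo hhi,
        ← PySem.Chars.exists_prefix_drop_iff_isIn]
    set lo := max 0 (me - (fc.length : Int)) with hlodef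
    set hi := max 0 (ms + (fc.length : Int)) with hhidef
    constructor
    · rintro ⟨j, hj⟩
      rw [List.drop_take, List.drop_drop, List.prefix_take_iff] at hj
      obtain ⟨hpre, hlen⟩ := hj
      refine ⟨lo.toNat + j, ?_, hpre, ?_, ?_⟩
      · -- fc nonempty and prefix of drop forces the occurrence inside ft
        by_contra hgt
        have hnil : ft.drop (lo.toNat + j) = [] := List.drop_eq_nil_of_le (by omega)
        rw [hnil, List.prefix_nil] at hpre
        exact h0 (by simp [hpre])
      · omega
      · omega
    · rintro ⟨s, hslen, hpre, hms, hme⟩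
      refine ⟨s - lo.toNat, ?_⟩
      have hslo : lo.toNat ≤ s := by omega
      rw [List.drop_take, List.drop_drop, List.prefix_take_iff,
          show lo.toNat + (s - lo.toNat) = s from by omega]
      exact ⟨hpre, by omega⟩

lemma pvHead_eq (ft fc : List Char) (ms me : Int) :
    pvALoop ft fc ms me (PySem.Chars.find ft fc) (ft.length + 1) = pvBCheck ft fc ms me := by
  have h := pvALoop_eq ft fc ms me (ft.length + 1) 0 (by omega) (by omega)
  rw [Nat.cast_zero, PySem.Chars.findFrom_zero] at h
  rw [Bool.eq_iff_iff, h, pvBCheck_eq]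
  unfold pvCovers
  constructor
  · rintro ⟨s, -, h⟩; exact ⟨s, h⟩
  · rintro ⟨s, h⟩; exact ⟨s, Nat.zero_le _, h⟩

-- ===== VERDICT (by name: the statement is the Claim_ definition above) =====
theorem is_allowed_context_py_spec : Claim_equal_is_allowed_context_py := by
  intro folded_text allow_context ms me hdom
  clear hdom
  unfold Spec_is_allowed_context_py
  induction allow_context with
  | nil => simp [is_allowed_context_py, is_allowed_context_py_alt]
  | cons context rest ih =>
    simp only [is_allowed_context_py, is_allowed_context_py_alt, List.any_cons]
    rw [pvHead_eq]
    cases h : pvBCheck folded_text.toList (PySem.Chars.lower context.toList) ms me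
    · simpa [h, is_allowed_context_py_alt] using ih
    · simp
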